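-- pv_equiv track=rewrite | github.com/Kietdzai/Bot-Spell-1-line-Casio-fx580vnx | Spell1lineCasiofx580vnx(English version).py | count_segments_around_20
-- ===== SOURCE A (Python) =====
-- def count_segments_around_20(template_result):
--     reversed_parts = list(reversed(template_result))
--     after_20 = 0
--     before_20 = 0
--     found_20 = False
--
--     for part in reversed_parts:
--         if part == 'x10':
--             continue
--         if part.startswith('1.'):
--             break
--         if not found_20:
--             if part == '20':
--                 found_20 = True
--                 continue
--             elif len(part) == 2:
--                 after_20 += 1
--         else:
--             if part == '20':
--                 break
--             if len(part) == 2: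
--                 before_20 += 1
--
--     if found_20:
--         return after_20, before_20
--     else:
--         total = after_20
--         return total, None
-- ===== SOURCE B (Python) =====
-- def count_segments_around_20(template_result):
--     rev = list(reversed(template_result))
--     stop = next((i for i, p in enumerate(rev) if p.startswith('1.')), len(rev))
--     rev = rev[:stop]
--     if '20' not in rev:
--         return sum(len(p) == 2 for p in rev), None
--     j = rev.index('20')
--     tail = rev[j + 1:]
--     if '20' in tail:
--         tail = tail[:tail.index('20')]
--     return sum(len(p) == 2 for p in rev[:j]), sum(len(p) == 2 for p in tail)
-- ===== Notes on version B (the rewrite author's own statement) =====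
-- stated objective: alternative
-- what changed: A's single stateful loop with a found_20 flag and mutable counters is replaced by a slice/index decomposition: reverse, cut at the first '1.'-prefixed part, locate the first (and next) '20' with list.index, and count length-2 parts in the resulting slices.
import Mathlib
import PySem

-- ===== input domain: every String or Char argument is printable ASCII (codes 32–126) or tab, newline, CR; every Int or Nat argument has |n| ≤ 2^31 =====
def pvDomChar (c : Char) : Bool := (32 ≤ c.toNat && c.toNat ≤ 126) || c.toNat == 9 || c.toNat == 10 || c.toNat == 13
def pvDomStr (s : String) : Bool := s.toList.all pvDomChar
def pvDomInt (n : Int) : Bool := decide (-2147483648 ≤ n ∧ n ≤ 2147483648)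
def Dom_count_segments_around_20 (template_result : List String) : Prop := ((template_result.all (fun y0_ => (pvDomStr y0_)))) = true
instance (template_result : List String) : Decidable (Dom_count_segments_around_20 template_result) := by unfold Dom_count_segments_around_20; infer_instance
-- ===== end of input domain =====

-- B replaces A's single flag-driven loop over the reversed list by a slice/index
-- decomposition (cut at the first '1.'-prefixed part, locate the '20' markers,
-- count length-2 parts in the resulting slices); objective: alternative decomposition.

-- ===== PORT A =====
-- literal port of A's for-loop with its mutable state (after_20, before_20, found_20);
-- a break returns the state without recursing
def pvALoop : List String → Int → Int → Bool → Int × Int × Bool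
  | [], a, b, f => (a, b, f)
  | p :: rest, a, b, f =>
    if p == "x10" then pvALoop rest a b f
    else if PySem.Str.startswith p "1." then (a, b, f)
    else if !f then
      if p == "20" then pvALoop rest a b true
      else if PySem.Str.len p == 2 then pvALoop rest (a + 1) b f
      else pvALoop rest a b f
    else
      if p == "20" then (a, b, f)
      else if PySem.Str.len p == 2 then pvALoop rest a (b + 1) f
      else pvALoop rest a b f

def count_segments_around_20 (template_result : List String) : Int × Option Int :=
  let st := pvALoop template_result.reverse 0 0 false
  if st.2.2 then (st.1, some st.2.1) else (st.1, none)

-- ===== PORT B =====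
-- sum(len(p) == 2 for p in l)
def pvCnt2 (l : List String) : Int :=
  ((l.countP (fun p => PySem.Str.len p == 2) : Nat) : Int)

def count_segments_around_20_alt (template_result : List String) : Int × Option Int :=
  let rev0 := template_result.reverse
  -- stop = next((i for i, p in enumerate(rev) if p.startswith('1.')), len(rev))
  let stop := (rev0.findIdx? (fun p => PySem.Str.startswith p "1.")).getD rev0.length
  let rev := rev0.take stop
  match PySem.List.index? rev "20" with
  | none => (pvCnt2 rev, none)
  | some j =>
      let tail0 := rev.drop (j + 1)
      let tail :=
        match PySem.List.index? tail0 "20" with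
        | none => tail0
        | some k => tail0.take k
      (pvCnt2 (rev.take j), some (pvCnt2 tail))

-- ===== PRECONDITION & SPEC =====
def Spec_count_segments_around_20 (template_result : List String) (out : Int × Option Int) : Prop := out = count_segments_around_20_alt template_result
instance (template_result : List String) (out : Int × Option Int) : Decidable (Spec_count_segments_around_20 template_result out) := by unfold Spec_count_segments_around_20; infer_instance

-- ===== CLAIM (what is proved, stated in full; the proofs are below) =====
def Claim_equal_count_segments_around_20 : Prop := ∀ (template_result : List String), Dom_count_segments_around_20 template_result → Spec_count_segments_around_20 template_result (count_segments_around_20 template_result)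

-- ===== LEMMAS AND PROOFS =====

-- proof-side views of B's slices: cut at the first '1.'-prefixed element …
def pvCut1 (l : List String) : List String :=
  l.take ((l.findIdx? (fun p => PySem.Str.startswith p "1.")).getD l.length)

-- … and cut a list at its first "20"
def pvTailCut (l : List String) : List String :=
  match PySem.List.index? l "20" with
  | none => l
  | some k => l.take k

def pvCutB (l : List String) : List String := pvTailCut (pvCut1 l)

-- recursive characterisation of A's phase-2 count (found_20 already true)
def pvG2 : List String → Int
  | [] => 0
  | p :: rest =>
    if p == "x10" then pvG2 rest
    else if PySem.Str.startswith p "1." then 0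
    else if p == "20" then 0
    else if PySem.Str.len p == 2 then 1 + pvG2 rest
    else pvG2 rest

-- recursive characterisation of A's whole pass starting with found_20 = false
def pvG1 : List String → Int × Option Int
  | [] => (0, none)
  | p :: rest =>
    if p == "x10" then pvG1 rest
    else if PySem.Str.startswith p "1." then (0, none)
    else if p == "20" then (0, some (pvG2 rest))
    else if PySem.Str.len p == 2 then ((pvG1 rest).1 + 1, (pvG1 rest).2)
    else pvG1 rest

-- B's computation with the reversal factored out
def pvBcore (l : List String) : Int × Option Int :=
  match PySem.List.index? (pvCut1 l) "20" with
  | none => (pvCnt2 (pvCut1 l), none)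
  | some j =>
      (pvCnt2 ((pvCut1 l).take j),
       some (pvCnt2 (pvTailCut ((pvCut1 l).drop (j + 1)))))

theorem pvALoop_true (l : List String) : ∀ a b : Int,
    pvALoop l a b true = (a, b + pvG2 l, true) := by
  induction l with
  | nil => intro a b; simp [pvALoop, pvG2]
  | cons p rest ih =>
    intro a b
    by_cases h1 : p = "x10"
    · subst h1; simp [pvALoop, pvG2, ih]
    · by_cases h2 : PySem.Chars.startswith p.toList ['1', '.'] = true
      · simp [pvALoop, pvG2, h1, h2]
      · by_cases h3 : p = "20"
        · subst h3; simp [pvALoop, pvG2]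
        · by_cases h4 : (p.length : Int) = 2
          · simp [pvALoop, pvG2, h1, h2, h3, h4, ih]; ring
          · simp [pvALoop, pvG2, h1, h2, h3, h4, ih]

theorem pvALoop_false (l : List String) : ∀ a b : Int,
    pvALoop l a b false =
      match (pvG1 l).2 with
      | none => (a + (pvG1 l).1, b, false)
      | some y => (a + (pvG1 l).1, b + y, true) := by
  induction l with
  | nil => intro a b; simp [pvALoop, pvG1]
  | cons p rest ih =>
    intro a b
    by_cases h1 : p = "x10"
    · subst h1; simp [pvALoop, pvG1, ih]
    · by_cases h2 : PySem.Chars.startswith p.toList ['1', '.'] = true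
      · simp [pvALoop, pvG1, h1, h2]
      · by_cases h3 : p = "20"
        · subst h3
          simp [pvALoop, pvG1, pvALoop_true,
            (by decide : PySem.Chars.startswith ['2','0'] ['1','.'] = false)]
        · by_cases h4 : (p.length : Int) = 2
          · simp [pvALoop, pvG1, h1, h2, h3, h4, ih]
            cases (pvG1 rest).2 <;> (simp; ring_nf)
          · simp [pvALoop, pvG1, h1, h2, h3, h4, ih]

theorem pvCut1_cons_pos (p : String) (l : List String)
    (h : PySem.Chars.startswith p.toList ['1', '.'] = true) : pvCut1 (p :: l) = [] := by
  simp [pvCut1, List.findIdx?_cons, h]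

theorem pvCut1_cons_neg (p : String) (l : List String)
    (h : ¬ PySem.Chars.startswith p.toList ['1', '.'] = true) : pvCut1 (p :: l) = p :: pvCut1 l := by
  simp [pvCut1, List.findIdx?_cons, h]

theorem pvCnt2_cons (p : String) (l : List String) :
    pvCnt2 (p :: l) = (if (p.length : Int) = 2 then 1 else 0) + pvCnt2 l := by
  simp only [pvCnt2, List.countP_cons]
  split_ifs with h <;> simp_all <;> omega

theorem pvCutB_start (p : String) (l : List String)
    (h : PySem.Chars.startswith p.toList ['1', '.'] = true) : pvCutB (p :: l) = [] := by
  simp [pvCutB, pvTailCut, pvCut1_cons_pos p l h, PySem.List.index?]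

theorem pvCutB_20 (l : List String) : pvCutB ("20" :: l) = [] := by
  have h2 : ¬ PySem.Chars.startswith ("20" : String).toList ['1', '.'] = true := by decide
  unfold pvCutB pvTailCut
  rw [pvCut1_cons_neg _ l h2, PySem.List.index?_cons_self]
  simp

theorem pvCutB_cons (p : String) (l : List String)
    (h2 : ¬ PySem.Chars.startswith p.toList ['1', '.'] = true) (hne : p ≠ "20") :
    pvCutB (p :: l) = p :: pvCutB l := by
  unfold pvCutB pvTailCut
  rw [pvCut1_cons_neg p l h2,
    PySem.List.index?_cons_of_ne (pvCut1 l) hne]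
  cases PySem.List.index? (pvCut1 l) "20" <;> simp

theorem pvG2_eq_cutB (l : List String) : pvG2 l = pvCnt2 (pvCutB l) := by
  induction l with
  | nil => simp [pvG2, pvCutB, pvTailCut, pvCut1, pvCnt2, PySem.List.index?]
  | cons p rest ih =>
    by_cases h2 : PySem.Chars.startswith p.toList ['1', '.'] = true
    · have h1 : ¬ p = "x10" := by
        intro h; subst h; simp [PySem.Chars.startswith] at h2
      simp [pvG2, pvCutB_start p rest h2, h1, h2, pvCnt2]
    · by_cases h3 : p = "20"
      · subst h3
        simp [pvG2, pvCutB_20, pvCnt2,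
          (by decide : PySem.Chars.startswith ['2','0'] ['1','.'] = false)]
      · rw [pvG2, pvCutB_cons p rest h2 h3, pvCnt2_cons]
        by_cases h1 : p = "x10"
        · subst h1; simp [ih]; decide
        · by_cases h4 : (p.length : Int) = 2 <;> simp [h1, h2, h3, h4, ih] <;> ring

theorem pvG1_eq_core (l : List String) : pvG1 l = pvBcore l := by
  induction l with
  | nil => simp [pvG1, pvBcore, pvCut1, pvCnt2, PySem.List.index?]
  | cons p rest ih =>
    by_cases h2 : PySem.Chars.startswith p.toList ['1', '.'] = true
    · have h1 : ¬ p = "x10" := by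
        intro h; subst h; simp [PySem.Chars.startswith] at h2
      simp [pvG1, pvBcore, pvCut1_cons_pos p rest h2, h1, h2, pvCnt2, PySem.List.index?]
    · by_cases h3 : p = "20"
      · subst h3
        have hcut := pvCut1_cons_neg ("20" : String) rest h2
        rw [pvG1, pvBcore, hcut, PySem.List.index?_cons_self]
        simp [pvG2_eq_cutB, pvCutB, pvCnt2,
          (by decide : PySem.Chars.startswith ['2','0'] ['1','.'] = false)]
      · have hcut := pvCut1_cons_neg p rest h2
        rw [pvG1, pvBcore, hcut, PySem.List.index?_cons_of_ne (pvCut1 rest) h3]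
        rw [pvBcore] at ih
        cases hi : PySem.List.index? (pvCut1 rest) "20" <;> rw [hi] at ih <;>
          by_cases h1 : p = "x10"
        · subst h1; simp [ih, pvCnt2_cons]; decide
        · by_cases h4 : (p.length : Int) = 2 <;>
            simp [h1, h2, h3, h4, ih, pvCnt2_cons] <;> ring
        · subst h1; simp [ih, pvCnt2_cons]; decide
        · by_cases h4 : (p.length : Int) = 2 <;>
            simp [h1, h2, h3, h4, ih, pvCnt2_cons] <;> ring

theorem pvA_eq_G1 (tr : List String) : count_segments_around_20 tr = pvG1 tr.reverse := by
  rcases hpv : pvG1 tr.reverse with ⟨x, o⟩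
  have h1 := pvALoop_false tr.reverse 0 0
  rw [hpv] at h1
  cases o <;> simp [count_segments_around_20, h1]

theorem pvAlt_eq_core (tr : List String) :
    count_segments_around_20_alt tr = pvBcore tr.reverse := by
  simp [count_segments_around_20_alt, pvBcore, pvCut1, pvTailCut]

-- ===== VERDICT (by name: the statement is the Claim_ definition above) =====
theorem count_segments_around_20_spec : Claim_equal_count_segments_around_20 := by
  intro tr _
  unfold Spec_count_segments_around_20
  rw [pvA_eq_G1 tr, pvG1_eq_core, pvAlt_eq_core]
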